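-- pv_equiv track=rewrite | github.com/braboj/tutorial-python | examples/C05_asyncio/01_generators/5_recursive.py | oddnum
-- ===== SOURCE A (Python) =====
-- def oddnum(offset=1, limit=10):
--
--     if (offset % 2) == 0:
--         offset += 1
--
--     if offset < limit:
--         yield offset
--     else:
--         return
--
--     for x in range(offset + 2, limit, 2):
--         yield next(oddnum(x, limit))
-- ===== SOURCE B (Python) =====
-- def oddnum(offset=1, limit=10):
--     if (offset % 2) == 0:
--         offset += 1
--     yield from range(offset, limit, 2)
-- ===== Notes on version B (the rewrite author's own statement) =====
-- stated objective: simpler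
-- what changed: Replaces A's recursion (which spawns a fresh generator and takes its first element for every subsequent odd number) by a single 'yield from range(offset, limit, 2)' after the same parity adjustment.
import Mathlib
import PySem

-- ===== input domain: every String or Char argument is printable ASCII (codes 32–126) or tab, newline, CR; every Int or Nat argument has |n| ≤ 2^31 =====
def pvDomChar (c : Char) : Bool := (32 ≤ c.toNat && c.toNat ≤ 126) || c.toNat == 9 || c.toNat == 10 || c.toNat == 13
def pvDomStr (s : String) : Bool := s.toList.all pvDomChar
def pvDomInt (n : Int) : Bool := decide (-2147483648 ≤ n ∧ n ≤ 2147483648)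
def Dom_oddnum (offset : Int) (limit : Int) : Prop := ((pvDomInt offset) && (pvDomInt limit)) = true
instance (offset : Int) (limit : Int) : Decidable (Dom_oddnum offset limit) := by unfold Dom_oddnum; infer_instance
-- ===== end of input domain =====

-- B replaces A's per-element recursive generator construction with a single step-2 range after the same parity adjustment (simpler decomposition).


-- ===== PORT A =====
-- Python generators are lazy: 'next(oddnum(x, limit))' runs the freshly created generator's
-- body only up to its FIRST yield (parity adjustment, the o < limit test, 'yield o'); the inner
-- generator's own for-loop is never entered.  oddnumNext is exactly that executed prefix:
-- 'some o' for the first yielded value, 'none' for StopIteration (which here never occurs,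
-- since every x drawn from range(offset+2, limit, 2) is odd and below limit; .getD 0 is
-- therefore never taken on any input).
def oddnumNext (offset : Int) (limit : Int) : Option Int :=
  let o := if PySem.Int.mod offset 2 = 0 then offset + 1 else offset
  if o < limit then some o else none

def oddnum (offset : Int) (limit : Int) : List Int :=
  let o := if PySem.Int.mod offset 2 = 0 then offset + 1 else offset
  if o < limit then
    o :: (PySem.List.pyRange (o + 2) limit 2).map (fun x => (oddnumNext x limit).getD 0)
  else []

-- ===== PORT B =====
def oddnum_alt (offset : Int) (limit : Int) : List Int :=
  let o := if PySem.Int.mod offset 2 = 0 then offset + 1 else offset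
  PySem.List.pyRange o limit 2

-- ===== PRECONDITION & SPEC =====
def Spec_oddnum (offset : Int) (limit : Int) (out : List Int) : Prop := out = oddnum_alt offset limit
instance (offset : Int) (limit : Int) (out : List Int) : Decidable (Spec_oddnum offset limit out) := by unfold Spec_oddnum; infer_instance

-- ===== CLAIM (what is proved, stated in full; the proofs are below) =====
def Claim_equal_oddnum : Prop := ∀ (offset : Int) (limit : Int), Dom_oddnum offset limit → Spec_oddnum offset limit (oddnum offset limit)

-- ===== LEMMAS AND PROOFS =====

theorem pyRange_two_eq_nil (a b : Int) (h : b ≤ a) : PySem.List.pyRange a b 2 = [] := by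
  rw [PySem.List.pyRange_of_pos _ _ (by norm_num)]
  simp [show ¬ a < b by omega]

theorem pyRange_two_cons (a b : Int) (h : a < b) :
    PySem.List.pyRange a b 2 = a :: PySem.List.pyRange (a + 2) b 2 := by
  rw [PySem.List.pyRange_of_pos _ _ (by norm_num), PySem.List.pyRange_of_pos _ _ (by norm_num)]
  have hc : (if a < b then ((b - a + 2 - 1) / 2).toNat else 0)
      = (if a + 2 < b then ((b - (a + 2) + 2 - 1) / 2).toNat else 0) + 1 := by
    split <;> split <;> omega
  rw [hc, List.range_succ_eq_map]
  simp [List.map_map, Function.comp]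
  intro k _
  ring

theorem oddnumNext_odd (x limit : Int) (hm : PySem.Int.mod x 2 ≠ 0) (hx : x < limit) :
    oddnumNext x limit = some x := by
  unfold oddnumNext
  rw [if_neg hm, if_pos hx]

-- ===== VERDICT (by name: the statement is the Claim_ definition above) =====
theorem oddnum_spec : Claim_equal_oddnum := by
  intro offset limit _
  unfold Spec_oddnum oddnum oddnum_alt
  have hodd : PySem.Int.mod (if PySem.Int.mod offset 2 = 0 then offset + 1 else offset) 2 ≠ 0 := by
    split <;> rename_i h <;>
      rw [PySem.Int.mod_eq_emod_of_pos (by norm_num)] at h ⊢ <;> omega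
  set o := if PySem.Int.mod offset 2 = 0 then offset + 1 else offset with ho
  by_cases h : o < limit
  · rw [if_pos h, pyRange_two_cons _ _ h]
    congr 1
    have hstep : ∀ x ∈ PySem.List.pyRange (o + 2) limit 2,
        (oddnumNext x limit).getD 0 = x := by
      intro x hx
      have hx := (PySem.List.mem_pyRange_iff_of_pos (by norm_num) x).mp hx
      have hmx : PySem.Int.mod x 2 ≠ 0 := by
        rw [PySem.Int.mod_eq_emod_of_pos (by norm_num)] at hodd ⊢
        omega
      rw [oddnumNext_odd x limit hmx (by omega)]
      rfl
    calc (PySem.List.pyRange (o + 2) limit 2).map (fun x => (oddnumNext x limit).getD 0)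
        = (PySem.List.pyRange (o + 2) limit 2).map id := List.map_congr_left hstep
      _ = PySem.List.pyRange (o + 2) limit 2 := List.map_id _
  · rw [if_neg h, pyRange_two_eq_nil _ _ (by omega)]
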